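-- pv_equiv track=rewrite | github.com/AlricLobo/TrumpingTweets | data.py | isEndTweet
-- ===== SOURCE A (Python) =====
-- def isEndTweet(text):
--     #how many . does the tweet end with? i.e. then he said...
--     count = 0
--     for i in reversed(text):
--         if i == '.':
--             count += 1
--         else:
--             return count
--     return count
-- ===== SOURCE B (Python) =====
-- def isEndTweet(text):
--     # forward single pass: remember the index of the last non-dot character;
--     # everything after it is the trailing run of dots
--     last = -1
--     for idx, ch in enumerate(text):
--         if ch != '.':
--             last = idx
--     return len(text) - 1 - last
-- ===== Notes on version B (the rewrite author's own statement) =====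
-- stated objective: alternative
-- what changed: Instead of scanning backwards from the end with a counter and early return, B makes one forward pass recording the index of the last non-dot character and returns len(text)-1-last.
import Mathlib
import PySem

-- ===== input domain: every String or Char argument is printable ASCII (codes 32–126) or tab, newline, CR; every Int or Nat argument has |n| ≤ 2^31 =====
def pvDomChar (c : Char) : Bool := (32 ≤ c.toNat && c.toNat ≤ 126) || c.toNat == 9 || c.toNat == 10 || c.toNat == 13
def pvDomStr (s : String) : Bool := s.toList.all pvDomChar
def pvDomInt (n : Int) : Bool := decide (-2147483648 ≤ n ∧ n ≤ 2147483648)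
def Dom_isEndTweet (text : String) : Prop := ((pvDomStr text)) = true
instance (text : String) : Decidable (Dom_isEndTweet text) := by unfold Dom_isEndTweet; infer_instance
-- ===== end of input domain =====

-- B replaces A's backward scan with early return by a forward pass tracking the last non-dot index (alternative, same cost).


-- ===== PORT A =====
-- the 'for i in reversed(text)' loop with its early return, as structural recursion
def isEndTweetLoop : List Char → Int → Int
  | [], count => count
  | c :: rest, count => if c == '.' then isEndTweetLoop rest (count + 1) else count

def isEndTweet (text : String) : Int :=
  isEndTweetLoop text.toList.reverse 0

-- ===== PORT B =====
-- the 'for idx, ch in enumerate(text)' loop updating 'last', then the closing arithmetic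
def isEndTweet_alt (text : String) : Int :=
  let last := (PySem.List.enumerate text.toList 0).foldl
    (fun last p => if p.2 ≠ '.' then p.1 else last) (-1)
  (text.toList.length : Int) - 1 - last

-- ===== PRECONDITION & SPEC =====
def Spec_isEndTweet (text : String) (out : Int) : Prop := out = isEndTweet_alt text
instance (text : String) (out : Int) : Decidable (Spec_isEndTweet text out) := by unfold Spec_isEndTweet; infer_instance

-- ===== CLAIM (what is proved, stated in full; the proofs are below) =====
def Claim_equal_isEndTweet : Prop := ∀ (text : String), Dom_isEndTweet text → Spec_isEndTweet text (isEndTweet text)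

-- ===== LEMMAS AND PROOFS =====
-- A's loop counts the leading '.'-run of its (reversed) argument
theorem isEndTweetLoop_eq (rs : List Char) (count : Int) :
    isEndTweetLoop rs count = count + ((rs.takeWhile (· == '.')).length : Int) := by
  induction rs generalizing count with
  | nil => simp [isEndTweetLoop]
  | cons c rest ih =>
    by_cases h : c = '.'
    · simp [isEndTweetLoop, h, List.takeWhile, ih]; ring
    · have hb : (c == '.') = false := by simp [h]
      simp [isEndTweetLoop, hb, List.takeWhile]

-- B's loop: the accumulator after the fold, as a function of the trailing-dot count
theorem lastFold_eq (cs : List Char) (s a : Int) :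
    (PySem.List.enumerate cs s).foldl (fun last p => if p.2 ≠ '.' then p.1 else last) a
      = (if (cs.reverse.takeWhile (· == '.')).length = cs.length then a
         else s + (cs.length : Int) - 1 - ((cs.reverse.takeWhile (· == '.')).length : Int)) := by
  induction cs using List.reverseRecOn generalizing s a with
  | nil => simp [PySem.List.enumerate]
  | append_singleton ds c ih =>
    have hle : (ds.reverse.takeWhile (· == '.')).length ≤ ds.length := by
      simpa using (List.takeWhile_prefix (p := (· == '.')) (l := ds.reverse)).length_le
    rw [PySem.List.enumerate_append, List.foldl_append, ih]
    by_cases h : c = '.'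
    · subst h
      have ht : ((ds ++ ['.']).reverse.takeWhile (· == '.')).length
          = (ds.reverse.takeWhile (· == '.')).length + 1 := by simp
      simp only [PySem.List.enumerate_cons, PySem.List.enumerate_nil, List.foldl_cons,
        List.foldl_nil, ht, List.length_append, List.length_cons, List.length_nil]
      rw [if_neg (not_not_intro rfl)]
      split_ifs <;> push_cast <;> omega
    · have ht : ((ds ++ [c]).reverse.takeWhile (· == '.')).length = 0 := by
        simp [h]
      simp only [PySem.List.enumerate_cons, PySem.List.enumerate_nil, List.foldl_cons,
        List.foldl_nil, ht, List.length_append, List.length_cons, List.length_nil]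
      rw [if_pos h]
      split_ifs <;> (try exact (‹False›).elim) <;> push_cast <;> omega

-- ===== VERDICT (by name: the statement is the Claim_ definition above) =====
theorem isEndTweet_spec : Claim_equal_isEndTweet := by
  intro text _
  show isEndTweet text = isEndTweet_alt text
  unfold isEndTweet isEndTweet_alt
  rw [isEndTweetLoop_eq, lastFold_eq]
  have hle : (text.toList.reverse.takeWhile (· == '.')).length ≤ text.toList.length := by
    simpa using (List.takeWhile_prefix (p := (· == '.')) (l := text.toList.reverse)).length_le
  by_cases hall : (text.toList.reverse.takeWhile (· == '.')).length = text.toList.length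
  · simp only [hall, if_pos rfl]; omega
  · simp only [if_neg hall]; push_cast; omega
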